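-- pv_equiv track=rewrite | github.com/Mopsephu/WordsExtractor | wordsextractor.py | countAmountOfSpacesAfterWordAtPosition
-- ===== SOURCE A (Python) =====
-- def countAmountOfWordsInText(text : str) -> int:
--     amount : int = 0;
--     isInWord : bool = False;
--     for i in text:
--         if i == " ":
--             if isInWord:
--                 isInWord = False;
--         else:
--             if not isInWord:
--                 isInWord = True;
--                 amount+=1;
--     return amount;
--
-- def countAmountOfSpacesAfterWordAtPosition(text : str, position : int) -> int:
--     amount : int = 0;
--     if position < 0:
--         position += countAmountOfWordsInText(text);
--     isInWord : bool = False;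
--     wordCount : int = 0;
--     foundStart : bool = False;
--     for i in text:
--         if not foundStart:
--             if i == " ":
--                 if isInWord:
--                     isInWord = False;
--                     if wordCount - 1 == position:
--                         foundStart = True;
--                         amount += 1;
--             else:
--                 if not isInWord:
--                     isInWord = True;
--                     wordCount+=1;
--         else:
--             if i == " ":
--                 amount += 1;
--             else:
--                 break;
--     return amount;
-- ===== SOURCE B (Python) =====
-- import re
--
-- def countAmountOfSpacesAfterWordAtPosition(text: str, position: int) -> int:
--     spans = [m.span() for m in re.finditer(r'[^ ]+', text)]
--     n = len(spans)
--     if position < 0: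
--         position += n
--     if not (0 <= position < n):
--         return 0
--     i = spans[position][1]
--     count = 0
--     while i + count < len(text) and text[i + count] == ' ':
--         count += 1
--     return count
-- ===== Notes on version B (the rewrite author's own statement) =====
-- stated objective: alternative
-- what changed: Replaces A's single-pass four-variable flag state machine (with an inner break loop) by an index-first approach: build the table of word spans with re.finditer(r'[^ ]+', text), range-check the (possibly negative-adjusted) position, then count consecutive spaces from the target span's end offset.
import Mathlib
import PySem

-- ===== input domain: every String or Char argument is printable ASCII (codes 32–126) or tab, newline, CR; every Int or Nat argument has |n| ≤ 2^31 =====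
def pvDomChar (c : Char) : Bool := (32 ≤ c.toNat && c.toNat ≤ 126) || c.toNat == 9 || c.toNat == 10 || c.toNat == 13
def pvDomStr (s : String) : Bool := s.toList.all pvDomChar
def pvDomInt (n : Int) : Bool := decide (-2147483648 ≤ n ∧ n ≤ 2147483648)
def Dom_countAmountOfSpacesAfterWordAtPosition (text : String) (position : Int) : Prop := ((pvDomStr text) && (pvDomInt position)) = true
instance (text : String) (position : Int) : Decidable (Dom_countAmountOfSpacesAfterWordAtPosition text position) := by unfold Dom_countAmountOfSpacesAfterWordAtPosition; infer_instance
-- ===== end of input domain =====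

-- B replaces A's single-pass flag state machine with "build the word-span table first,
-- then count spaces at the target span's end" (objective: alternative decomposition).

-- ===== PORT A =====
-- helper of A: countAmountOfWordsInText's loop (state: amount, isInWord)
def pvCountWordsLoop : List Char → Int → Bool → Int
  | [], amount, _ => amount
  | c :: rest, amount, isInWord =>
    if c = ' ' then
      (if isInWord then pvCountWordsLoop rest amount false
       else pvCountWordsLoop rest amount isInWord)
    else
      (if !isInWord then pvCountWordsLoop rest (amount + 1) true
       else pvCountWordsLoop rest amount isInWord)

def countAmountOfWordsInText (text : String) : Int :=
  pvCountWordsLoop text.toList 0 false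

-- A's main loop (state: amount, isInWord, wordCount, foundStart; `break` returns amount)
def pvLoopA (position : Int) : List Char → Int → Bool → Int → Bool → Int
  | [], amount, _, _, _ => amount
  | c :: rest, amount, isInWord, wordCount, foundStart =>
    if !foundStart then
      if c = ' ' then
        if isInWord then
          (if wordCount - 1 = position then
            pvLoopA position rest (amount + 1) false wordCount true
          else
            pvLoopA position rest amount false wordCount foundStart)
        else pvLoopA position rest amount isInWord wordCount foundStart
      else
        if !isInWord then pvLoopA position rest amount true (wordCount + 1) foundStart
        else pvLoopA position rest amount isInWord wordCount foundStart
    else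
      if c = ' ' then pvLoopA position rest (amount + 1) isInWord wordCount foundStart
      else amount

def countAmountOfSpacesAfterWordAtPosition (text : String) (position : Int) : Int :=
  let position' := if position < 0 then position + countAmountOfWordsInText text else position
  pvLoopA position' text.toList 0 false 0 false

-- ===== PORT B =====
-- length of the maximal leading run of non-space characters
def pvRunLen (cs : List Char) : Nat := (cs.takeWhile (fun x => x ≠ ' ')).length

-- port of re.finditer(r'[^ ]+', text): the (start, end) spans of the maximal runs of
-- non-space characters, scanning from absolute offset i
def pvFindSpans : List Char → Nat → List (Nat × Nat)
  | [], _ => []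
  | c :: rest, i =>
    if c = ' ' then pvFindSpans rest (i + 1)
    else (i, i + 1 + pvRunLen rest) :: pvFindSpans (rest.drop (pvRunLen rest)) (i + 1 + pvRunLen rest)
  termination_by cs _ => cs.length
  decreasing_by all_goals (simp [List.length_drop]; try omega)

-- port of B's counting while-loop: number of leading spaces of the given suffix
def pvCountSpaces : List Char → Int
  | [] => 0
  | c :: rest => if c = ' ' then 1 + pvCountSpaces rest else 0

def countAmountOfSpacesAfterWordAtPosition_alt (text : String) (position : Int) : Int :=
  let cs := text.toList
  let spans := pvFindSpans cs 0
  let n : Int := spans.length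
  let p := if position < 0 then position + n else position
  if 0 ≤ p ∧ p < n then
    match spans[p.toNat]? with
    | some s => pvCountSpaces (cs.drop s.2)
    | none => 0
  else 0

-- ===== PRECONDITION & SPEC =====
def Spec_countAmountOfSpacesAfterWordAtPosition (text : String) (position : Int) (out : Int) : Prop := out = countAmountOfSpacesAfterWordAtPosition_alt text position
instance (text : String) (position : Int) (out : Int) : Decidable (Spec_countAmountOfSpacesAfterWordAtPosition text position out) := by unfold Spec_countAmountOfSpacesAfterWordAtPosition; infer_instance

-- ===== CLAIM (what is proved, stated in full; the proofs are below) =====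
def Claim_equal_countAmountOfSpacesAfterWordAtPosition : Prop := ∀ (text : String) (position : Int), Dom_countAmountOfSpacesAfterWordAtPosition text position → Spec_countAmountOfSpacesAfterWordAtPosition text position (countAmountOfSpacesAfterWordAtPosition text position)

-- ===== LEMMAS AND PROOFS =====

-- B's "lookup + count", abstracted over the char list and an integer word index j
def pvAltCore (cs : List Char) (j : Int) : Int :=
  if 0 ≤ j ∧ j < ((pvFindSpans cs 0).length : Int) then
    match (pvFindSpans cs 0)[j.toNat]? with
    | some s => pvCountSpaces (cs.drop s.2)
    | none => 0
  else 0

theorem pvFindSpans_shift_aux (n : Nat) : ∀ cs : List Char, cs.length ≤ n → ∀ i : Nat,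
    pvFindSpans cs i = (pvFindSpans cs 0).map (fun p => (p.1 + i, p.2 + i)) := by
  induction n with
  | zero =>
    intro cs h i
    have hnil : cs = [] := by cases cs <;> simp_all
    subst hnil; simp [pvFindSpans]
  | succ n ih =>
    intro cs h i
    match cs with
    | [] => simp [pvFindSpans]
    | c :: rest =>
      by_cases hc : c = ' '
      · rw [pvFindSpans, pvFindSpans]
        simp only [hc, if_pos]
        have h1 : rest.length ≤ n := by simp at h; omega
        rw [ih rest h1 (i+1), ih rest h1 1, List.map_map]
        apply List.map_congr_left
        intro p _
        simp [Function.comp, Prod.ext_iff]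
        try omega
      · rw [pvFindSpans, pvFindSpans]
        simp only [if_neg hc]
        have hd : (rest.drop (pvRunLen rest)).length ≤ n := by
          simp at h ⊢; omega
        rw [ih _ hd (i + 1 + pvRunLen rest), ih _ hd (0 + 1 + pvRunLen rest),
            List.map_cons, List.map_map]
        refine congrArg₂ List.cons ?_ ?_
        · simp [Prod.ext_iff]
          try omega
        · apply List.map_congr_left
          intro p _
          simp [Function.comp, Prod.ext_iff]
          try omega

theorem pvFindSpans_shift (cs : List Char) (i : Nat) :
    pvFindSpans cs i = (pvFindSpans cs 0).map (fun p => (p.1 + i, p.2 + i)) :=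
  pvFindSpans_shift_aux cs.length cs le_rfl i

theorem pvFindSpans_length (cs : List Char) (i : Nat) :
    (pvFindSpans cs i).length = (pvFindSpans cs 0).length := by
  rw [pvFindSpans_shift]; simp

theorem pvAltCore_space (rest : List Char) (j : Int) :
    pvAltCore (' ' :: rest) j = pvAltCore rest j := by
  have hspan : pvFindSpans (' ' :: rest) 0 =
      (pvFindSpans rest 0).map (fun p => (p.1 + 1, p.2 + 1)) := by
    rw [pvFindSpans]; simp [pvFindSpans_shift rest 1]
  unfold pvAltCore
  rw [hspan]
  simp only [List.length_map]
  split_ifs with h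
  · rw [List.getElem?_map]
    cases hs : (pvFindSpans rest 0)[j.toNat]? with
    | none => simp
    | some s => simp [List.drop_succ_cons]
  · rfl

theorem pvAltCore_word (c : Char) (rest : List Char) (j : Int) (hc : ¬ c = ' ') :
    pvAltCore (c :: rest) j =
      if j = 0 then pvCountSpaces (rest.drop (pvRunLen rest))
      else pvAltCore (rest.drop (pvRunLen rest)) (j - 1) := by
  have hspan : pvFindSpans (c :: rest) 0 =
      (0, 1 + pvRunLen rest) ::
        (pvFindSpans (rest.drop (pvRunLen rest)) 0).map
          (fun p => (p.1 + (1 + pvRunLen rest), p.2 + (1 + pvRunLen rest))) := by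
    rw [pvFindSpans]
    simp only [if_neg hc]
    rw [pvFindSpans_shift (rest.drop (pvRunLen rest)) (0 + 1 + pvRunLen rest)]
  unfold pvAltCore
  rw [hspan]
  simp only [List.length_cons, List.length_map]
  by_cases hj : j = 0
  · subst hj
    rw [if_pos rfl]
    split_ifs with h1
    · simp only [Int.toNat_zero, List.getElem?_cons_zero]
      have he : 1 + pvRunLen rest = pvRunLen rest + 1 := by omega
      rw [he, List.drop_succ_cons]
    · exfalso
      apply h1
      constructor
      · omega
      · push_cast; omega
  · rw [if_neg hj]
    split_ifs with h1 h2 h3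
    · -- both lookups in range
      have hjt : j.toNat = (j - 1).toNat + 1 := by omega
      rw [hjt, List.getElem?_cons_succ, List.getElem?_map]
      cases hs : (pvFindSpans (rest.drop (pvRunLen rest)) 0)[(j - 1).toNat]? with
      | none => simp
      | some s =>
        simp only [Option.map_some]
        have h4 : s.2 + (1 + pvRunLen rest) = (s.2 + pvRunLen rest) + 1 := by omega
        have h5 : (rest.drop (pvRunLen rest)).drop s.2 = rest.drop (s.2 + pvRunLen rest) := by
          rw [List.drop_drop]
          try (congr 1; omega)
        rw [h4, List.drop_succ_cons, h5]
    · -- left in range, right out of range: left lookup is past the end too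
      have hjt : j.toNat = (j - 1).toNat + 1 := by omega
      rw [hjt, List.getElem?_cons_succ,
          List.getElem?_eq_none (by simp only [List.length_map]; omega)]
    · exfalso; omega
    · rfl

-- one-step equations of A's loops (the `rw [pvLoopA]; simp` normal forms)
theorem stepA_space_false (p : Int) (rest : List Char) (wc : Int) :
    pvLoopA p (' ' :: rest) 0 false wc false = pvLoopA p rest 0 false wc false := by
  rw [pvLoopA]; simp

theorem stepA_space_true (p : Int) (rest : List Char) (wc : Int) :
    pvLoopA p (' ' :: rest) 0 true wc false =
      if wc - 1 = p then pvLoopA p rest (0 + 1) false wc true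
      else pvLoopA p rest 0 false wc false := by
  rw [pvLoopA]; simp

theorem stepA_word_false (p : Int) (c : Char) (rest : List Char) (wc : Int) (hc : ¬ c = ' ') :
    pvLoopA p (c :: rest) 0 false wc false = pvLoopA p rest 0 true (wc + 1) false := by
  rw [pvLoopA]; simp [hc]

theorem stepA_word_true (p : Int) (c : Char) (rest : List Char) (wc : Int) (hc : ¬ c = ' ') :
    pvLoopA p (c :: rest) 0 true wc false = pvLoopA p rest 0 true wc false := by
  rw [pvLoopA]; simp [hc]

theorem stepA_found (p : Int) (c : Char) (rest : List Char) (amount : Int) (inW : Bool) (wc : Int) :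
    pvLoopA p (c :: rest) amount inW wc true =
      if c = ' ' then pvLoopA p rest (amount + 1) inW wc true else amount := by
  rw [pvLoopA]; simp

theorem pvLoopA_found (p : Int) : ∀ (cs : List Char) (amount : Int) (inW : Bool) (wc : Int),
    pvLoopA p cs amount inW wc true = amount + pvCountSpaces cs := by
  intro cs
  induction cs with
  | nil => intro amount inW wc; rw [pvLoopA, pvCountSpaces]; ring
  | cons c rest ih =>
    intro amount inW wc
    rw [stepA_found, pvCountSpaces]
    by_cases hc : c = ' '
    · rw [if_pos hc, if_pos hc, ih]; ring
    · rw [if_neg hc, if_neg hc]; ring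

theorem pvRunLen_space (rest : List Char) : pvRunLen (' ' :: rest) = 0 := by
  simp [pvRunLen, List.takeWhile]

theorem pvRunLen_word (c : Char) (rest : List Char) (hc : ¬ c = ' ') :
    pvRunLen (c :: rest) = 1 + pvRunLen rest := by
  simp [pvRunLen, List.takeWhile, hc]
  omega

theorem pvAltCore_nil (j : Int) : pvAltCore [] j = 0 := by
  unfold pvAltCore
  rw [if_neg]
  rintro ⟨h1, h2⟩
  rw [pvFindSpans] at h2
  simp at h2
  omega

theorem pvLoopA_main (p : Int) : ∀ (cs : List Char) (wc : Int),
    (pvLoopA p cs 0 false wc false = pvAltCore cs (p - wc)) ∧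
    (pvLoopA p cs 0 true wc false =
      if p = wc - 1 then pvCountSpaces (cs.drop (pvRunLen cs))
      else pvAltCore (cs.drop (pvRunLen cs)) (p - wc)) := by
  intro cs
  induction cs with
  | nil =>
    intro wc
    constructor
    · rw [pvLoopA, pvAltCore_nil]
    · rw [pvLoopA]
      simp [pvRunLen, pvCountSpaces, pvAltCore_nil]
  | cons c rest ih =>
    intro wc
    by_cases hc : c = ' '
    · subst hc
      constructor
      · rw [stepA_space_false, (ih wc).1, pvAltCore_space]
      · rw [stepA_space_true, pvRunLen_space, List.drop_zero]
        by_cases hcond : wc - 1 = p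
        · rw [if_pos hcond, if_pos (show p = wc - 1 by omega), pvLoopA_found, pvCountSpaces]
          simp
        · rw [if_neg hcond, if_neg (show ¬ p = wc - 1 by omega), (ih wc).1, pvAltCore_space]
    · have hdrop : (c :: rest).drop (1 + pvRunLen rest) = rest.drop (pvRunLen rest) := by
        have he : 1 + pvRunLen rest = pvRunLen rest + 1 := by omega
        rw [he, List.drop_succ_cons]
      constructor
      · rw [stepA_word_false p c rest wc hc, (ih (wc + 1)).2, pvAltCore_word c rest _ hc]
        by_cases hcond : p = wc
        · rw [if_pos (show p = wc + 1 - 1 by omega), if_pos (show p - wc = 0 by omega)]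
        · rw [if_neg (show ¬ p = wc + 1 - 1 by omega), if_neg (show ¬ p - wc = 0 by omega)]
          congr 1
          omega
      · rw [stepA_word_true p c rest wc hc, (ih wc).2, pvRunLen_word c rest hc, hdrop]

-- one-step equations of A's word-counting loop
theorem stepW_space (rest : List Char) (a : Int) (inW : Bool) :
    pvCountWordsLoop (' ' :: rest) a inW = pvCountWordsLoop rest a false := by
  rw [pvCountWordsLoop]
  cases inW <;> simp

theorem stepW_word_false (c : Char) (rest : List Char) (a : Int) (hc : ¬ c = ' ') :
    pvCountWordsLoop (c :: rest) a false = pvCountWordsLoop rest (a + 1) true := by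
  rw [pvCountWordsLoop]; simp [hc]

theorem stepW_word_true (c : Char) (rest : List Char) (a : Int) (hc : ¬ c = ' ') :
    pvCountWordsLoop (c :: rest) a true = pvCountWordsLoop rest a true := by
  rw [pvCountWordsLoop]; simp [hc]

theorem pvCountWords_eq_aux (n : Nat) : ∀ cs : List Char, cs.length ≤ n → ∀ a : Int,
    (pvCountWordsLoop cs a false = a + ((pvFindSpans cs 0).length : Int)) ∧
    (pvCountWordsLoop cs a true =
      a + ((pvFindSpans (cs.drop (pvRunLen cs)) 0).length : Int)) := by
  induction n with
  | zero =>
    intro cs h a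
    have hnil : cs = [] := by cases cs <;> simp_all
    subst hnil
    constructor <;> (rw [pvCountWordsLoop]; simp [pvFindSpans, pvRunLen])
  | succ n ih =>
    intro cs h a
    match cs with
    | [] => constructor <;> (rw [pvCountWordsLoop]; simp [pvFindSpans, pvRunLen])
    | c :: rest =>
      have h1 : rest.length ≤ n := by simp at h; omega
      by_cases hc : c = ' '
      · subst hc
        have hlen : (pvFindSpans (' ' :: rest) 0).length = (pvFindSpans rest 0).length := by
          rw [pvFindSpans]; simp [pvFindSpans_length]
        constructor
        · rw [stepW_space, (ih rest h1 a).1, hlen]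
        · rw [stepW_space, (ih rest h1 a).1, pvRunLen_space, List.drop_zero, hlen]
      · have hd : (rest.drop (pvRunLen rest)).length ≤ n := by
          simp at h ⊢; omega
        have hlen : ((pvFindSpans (c :: rest) 0).length : Int) =
            1 + ((pvFindSpans (rest.drop (pvRunLen rest)) 0).length : Int) := by
          rw [pvFindSpans]
          simp only [if_neg hc, List.length_cons, pvFindSpans_length]
          push_cast; omega
        have hdrop : (c :: rest).drop (pvRunLen (c :: rest)) = rest.drop (pvRunLen rest) := by
          rw [pvRunLen_word c rest hc]
          have he : 1 + pvRunLen rest = pvRunLen rest + 1 := by omega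
          rw [he, List.drop_succ_cons]
        constructor
        · rw [stepW_word_false c rest a hc, (ih rest h1 (a + 1)).2, hlen]; ring
        · rw [stepW_word_true c rest a hc, (ih rest h1 a).2, hdrop]

theorem pvCountWords_eq (cs : List Char) :
    pvCountWordsLoop cs 0 false = ((pvFindSpans cs 0).length : Int) := by
  have := (pvCountWords_eq_aux cs.length cs le_rfl 0).1
  simpa using this

theorem pvAlt_eq (text : String) (position : Int) :
    countAmountOfSpacesAfterWordAtPosition_alt text position =
      pvAltCore text.toList
        (if position < 0 then position + ((pvFindSpans text.toList 0).length : Int)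
         else position) := by
  rfl

theorem pvA_eq (text : String) (position : Int) :
    countAmountOfSpacesAfterWordAtPosition text position =
      pvLoopA (if position < 0 then position + pvCountWordsLoop text.toList 0 false else position)
        text.toList 0 false 0 false := by
  rfl

-- ===== VERDICT (by name: the statement is the Claim_ definition above) =====
theorem countAmountOfSpacesAfterWordAtPosition_spec : Claim_equal_countAmountOfSpacesAfterWordAtPosition := by
  intro text position _
  unfold Spec_countAmountOfSpacesAfterWordAtPosition
  rw [pvA_eq, pvAlt_eq, pvCountWords_eq]
  have hmain := (pvLoopA_main
      (if position < 0 then position + ((pvFindSpans text.toList 0).length : Int) else position)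
      text.toList 0).1
  simpa using hmain
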